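-- pv_equiv track=rewrite | github.com/jcbdelo26/chiefaiofficer-alpha-swarm | dashboard/health_app.py | _categorize_rejection
-- ===== SOURCE A (Python) =====
-- def _categorize_rejection(reason: str) -> str:
--     """Categorize rejection reason for ML training patterns."""
--     reason_lower = (reason or "").lower()
--
--     if any(word in reason_lower for word in ["tone", "formal", "casual", "aggressive"]):
--         return "tone_issue"
--     elif any(word in reason_lower for word in ["wrong", "incorrect", "inaccurate", "fact"]):
--         return "accuracy_issue"
--     elif any(word in reason_lower for word in ["long", "short", "verbose", "brief"]):
--         return "length_issue"
--     elif any(word in reason_lower for word in ["personal", "generic", "template"]):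
--         return "personalization_issue"
--     elif any(word in reason_lower for word in ["subject", "headline", "title"]):
--         return "subject_issue"
--     elif any(word in reason_lower for word in ["cta", "call to action", "ask"]):
--         return "cta_issue"
--     else:
--         return "other"
-- ===== SOURCE B (Python) =====
-- # Full-pass minimum-priority scoring over a flat keyword->priority map
-- # (no early exit, no per-category branches; order of iteration is irrelevant).
-- _KEYWORD_PRIORITY = {
--     "tone": 0, "formal": 0, "casual": 0, "aggressive": 0,
--     "wrong": 1, "incorrect": 1, "inaccurate": 1, "fact": 1,
--     "long": 2, "short": 2, "verbose": 2, "brief": 2,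
--     "personal": 3, "generic": 3, "template": 3,
--     "subject": 4, "headline": 4, "title": 4,
--     "cta": 5, "call to action": 5, "ask": 5,
-- }
-- _LABELS = ["tone_issue", "accuracy_issue", "length_issue",
--            "personalization_issue", "subject_issue", "cta_issue", "other"]
--
-- def _categorize_rejection(reason: str) -> str:
--     """Categorize rejection reason: best (lowest) priority of any matching keyword."""
--     reason_lower = (reason or "").lower()
--     best = 6
--     for word, pri in _KEYWORD_PRIORITY.items():
--         if pri < best and word in reason_lower:
--             best = pri
--     return _LABELS[best]
-- ===== Notes on version B (the rewrite author's own statement) =====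
-- stated objective: alternative
-- what changed: The six-branch if/elif cascade of any()-tests is replaced by a single full pass over a flat keyword-to-priority map that accumulates the minimum priority of any matching keyword and indexes a label array with it; no early exit and no per-category grouping remain.
import Mathlib
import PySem

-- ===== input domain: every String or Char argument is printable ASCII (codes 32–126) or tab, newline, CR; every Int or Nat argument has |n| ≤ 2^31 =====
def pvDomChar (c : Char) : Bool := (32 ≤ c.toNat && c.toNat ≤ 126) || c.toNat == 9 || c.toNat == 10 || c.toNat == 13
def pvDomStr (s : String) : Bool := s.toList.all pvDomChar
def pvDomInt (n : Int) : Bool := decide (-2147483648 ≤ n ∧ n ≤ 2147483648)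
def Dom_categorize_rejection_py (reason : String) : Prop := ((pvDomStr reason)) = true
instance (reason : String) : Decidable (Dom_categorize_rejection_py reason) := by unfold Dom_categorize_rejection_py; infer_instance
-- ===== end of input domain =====

-- B replaces the if/elif cascade by a full pass over a flat keyword→priority map,
-- accumulating the minimum priority of any matching keyword (objective: alternative).

-- ===== PORT A =====
def categorize_rejection_py (reason : String) : String :=
  let reason_lower := PySem.Str.lower reason  -- (reason or "") = reason for strings: "" lowers to ""
  if ["tone", "formal", "casual", "aggressive"].any (fun w => PySem.Str.isIn w reason_lower) then
    "tone_issue"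
  else if ["wrong", "incorrect", "inaccurate", "fact"].any (fun w => PySem.Str.isIn w reason_lower) then
    "accuracy_issue"
  else if ["long", "short", "verbose", "brief"].any (fun w => PySem.Str.isIn w reason_lower) then
    "length_issue"
  else if ["personal", "generic", "template"].any (fun w => PySem.Str.isIn w reason_lower) then
    "personalization_issue"
  else if ["subject", "headline", "title"].any (fun w => PySem.Str.isIn w reason_lower) then
    "subject_issue"
  else if ["cta", "call to action", "ask"].any (fun w => PySem.Str.isIn w reason_lower) then
    "cta_issue"
  else
    "other"

-- ===== PORT B =====
-- _KEYWORD_PRIORITY.items() in insertion order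
def pvKeywordPri : List (String × Nat) :=
  [("tone", 0), ("formal", 0), ("casual", 0), ("aggressive", 0),
   ("wrong", 1), ("incorrect", 1), ("inaccurate", 1), ("fact", 1),
   ("long", 2), ("short", 2), ("verbose", 2), ("brief", 2),
   ("personal", 3), ("generic", 3), ("template", 3),
   ("subject", 4), ("headline", 4), ("title", 4),
   ("cta", 5), ("call to action", 5), ("ask", 5)]

def pvLabels : List String :=
  ["tone_issue", "accuracy_issue", "length_issue",
   "personalization_issue", "subject_issue", "cta_issue", "other"]

def categorize_rejection_py_alt (reason : String) : String :=
  let reason_lower := PySem.Str.lower reason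
  let best := pvKeywordPri.foldl
    (fun best p => if p.2 < best ∧ PySem.Str.isIn p.1 reason_lower = true then p.2 else best) 6
  -- _LABELS[best]: best is always in 0..6, so the plain-index lookup; default is never hit
  pvLabels.getD best "other"

-- ===== PRECONDITION & SPEC =====
def Spec_categorize_rejection_py (reason : String) (out : String) : Prop := out = categorize_rejection_py_alt reason
instance (reason : String) (out : String) : Decidable (Spec_categorize_rejection_py reason out) := by unfold Spec_categorize_rejection_py; infer_instance

-- ===== CLAIM (what is proved, stated in full; the proofs are below) =====
def Claim_equal_categorize_rejection_py : Prop := ∀ (reason : String), Dom_categorize_rejection_py reason → Spec_categorize_rejection_py reason (categorize_rejection_py reason)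

-- ===== LEMMAS AND PROOFS =====

-- folding a group of keywords that all carry the same priority p lowers the
-- accumulator to p exactly when p < best and some keyword matches
theorem pv_foldl_const_pri (rl : String) (ws : List String) (p best : Nat) :
    (ws.map (fun w => (w, p))).foldl
      (fun b q => if q.2 < b ∧ PySem.Str.isIn q.1 rl = true then q.2 else b) best
    = if p < best ∧ ws.any (fun w => PySem.Str.isIn w rl) = true then p else best := by
  induction ws generalizing best with
  | nil => simp
  | cons w ws ih =>
    simp only [List.map_cons, List.foldl_cons, List.any_cons, Bool.or_eq_true]
    rw [ih]
    by_cases hw : PySem.Str.isIn w rl = true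
    · simp only [hw, and_true]
      by_cases hp : p < best
      · simp [hp]
      · simp [hp]
    · simp only [PySem.Str.isIn_eq] at hw
      simp [hw]

-- the flat keyword list is the six groups in priority order
theorem pv_keywordPri_eq :
    pvKeywordPri =
      (["tone", "formal", "casual", "aggressive"].map (fun w => (w, 0)))
      ++ (["wrong", "incorrect", "inaccurate", "fact"].map (fun w => (w, 1)))
      ++ (["long", "short", "verbose", "brief"].map (fun w => (w, 2)))
      ++ (["personal", "generic", "template"].map (fun w => (w, 3)))
      ++ (["subject", "headline", "title"].map (fun w => (w, 4)))
      ++ (["cta", "call to action", "ask"].map (fun w => (w, 5))) := rfl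

-- ===== VERDICT (by name: the statement is the Claim_ definition above) =====
theorem categorize_rejection_py_spec : Claim_equal_categorize_rejection_py := by
  intro reason _
  unfold Spec_categorize_rejection_py
  simp only [categorize_rejection_py, categorize_rejection_py_alt, pv_keywordPri_eq,
    List.foldl_append, pv_foldl_const_pri]
  generalize (["tone", "formal", "casual", "aggressive"].any
    (fun w => PySem.Str.isIn w (PySem.Str.lower reason))) = b1
  generalize (["wrong", "incorrect", "inaccurate", "fact"].any
    (fun w => PySem.Str.isIn w (PySem.Str.lower reason))) = b2
  generalize (["long", "short", "verbose", "brief"].any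
    (fun w => PySem.Str.isIn w (PySem.Str.lower reason))) = b3
  generalize (["personal", "generic", "template"].any
    (fun w => PySem.Str.isIn w (PySem.Str.lower reason))) = b4
  generalize (["subject", "headline", "title"].any
    (fun w => PySem.Str.isIn w (PySem.Str.lower reason))) = b5
  generalize (["cta", "call to action", "ask"].any
    (fun w => PySem.Str.isIn w (PySem.Str.lower reason))) = b6
  cases b1 <;> cases b2 <;> cases b3 <;> cases b4 <;> cases b5 <;> cases b6 <;> rfl
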